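-- pv_equiv track=rewrite | github.com/rsarwas/aoc | 2023-13/answers.py | reflection_offsets
-- ===== SOURCE A (Python) =====
-- def is_palindrome(line, n, rev_line=None):
--     """Return true if line is a palindrome when omitting the first
--     n characters (if n is positive), or the last n characters if n is negative.
--     providing the reverse of line will be more efficient if this is called with various n.
--     n must be less than len(line) - 2; this leaves 2 characters to compare.
--     comparing 1 or less makes no sense in this puzzle."""
--     if abs(n) > len(line) - 2:
--         raise ValueError
--     if rev_line is None:
--         if isinstance(line, list):
--             rev_line = list(reversed(line))
--         else:
--             rev_line = "".join(reversed(line))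
--     if n == 0:
--         return line == rev_line
--     if n > 0:
--         return line[n:] == rev_line[:-n]
--     return line[:n] == rev_line[-n:]
--
-- def reflection_offsets(line):
--     """Return all the offsets for a reflection point in a line of text.
--     An offset is the amount of text to remove at the start (positive offset), or
--     the end (negative offset) of a line to create a palindrome.
--     line can be a string or a list of characters."""
--     if isinstance(line, list):
--         rev_line = list(reversed(line))
--     else:
--         rev_line = "".join(reversed(line))
--     r = range(0, len(line), 2)
--     if len(line) % 2 == 1:
--         r = range(1, len(line), 2)
--     offsets = []
--     for i in r:
--         for m in (-1, 1):
--             n = m * i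
--             if is_palindrome(line, n, rev_line):
--                 offsets.append(n)
--     return offsets
-- ===== SOURCE B (Python) =====
-- def _pal(s, lo, hi):
--     """Two-pointer in-place palindrome check of s[lo..hi] inclusive."""
--     while lo < hi:
--         if s[lo] != s[hi]:
--             return False
--         lo += 1
--         hi -= 1
--     return True
--
-- def reflection_offsets(line):
--     s = list(line)
--     n = len(s)
--     offsets = []
--     for i in range(n % 2, n, 2):
--         if _pal(s, 0, n - 1 - i):
--             offsets.append(-i)
--         if _pal(s, i, n - 1):
--             offsets.append(i)
--     return offsets
-- ===== Notes on version B (the rewrite author's own statement) =====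
-- stated objective: alternative
-- what changed: A builds a full reversed copy of the line and tests each offset by slicing both copies and comparing the slices; B keeps one list and tests each offset with an in-place two-pointer palindrome scan that exits on the first mismatch, with no reversed copy and no slice copies.
import Mathlib
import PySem

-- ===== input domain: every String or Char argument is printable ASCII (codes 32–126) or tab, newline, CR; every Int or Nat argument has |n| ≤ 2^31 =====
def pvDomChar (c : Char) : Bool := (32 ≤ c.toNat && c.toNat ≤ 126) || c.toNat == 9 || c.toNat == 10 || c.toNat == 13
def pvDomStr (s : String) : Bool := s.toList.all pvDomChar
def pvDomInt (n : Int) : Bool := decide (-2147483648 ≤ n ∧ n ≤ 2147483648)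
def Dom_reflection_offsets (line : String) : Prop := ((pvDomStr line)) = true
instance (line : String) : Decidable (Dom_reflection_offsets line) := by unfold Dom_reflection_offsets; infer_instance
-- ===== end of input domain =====

-- B replaces A's build-the-reversed-string-and-compare-slices palindrome test by an in-place
-- two-pointer check (no reversed copy, no slice copies, early exit on first mismatch); same
-- offsets in the same order. (objective: alternative)

-- ===== PORT A =====
-- Strings are carried as List Char (PySem string ops are defined over List Char).
-- is_palindrome's ValueError branch is `none`; reflection_offsets only calls it with
-- |n| ≤ len-2 (proved below), so testing `= some true` never hides a raise on those calls.
def isPalindromeA (l rev : List Char) (n : Int) : Option Bool :=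
  if ((n.natAbs : Int) > (l.length : Int) - 2) then none
  else if n = 0 then some (l == rev)
  else if n > 0 then
    some (PySem.List.slice l (some n) none == PySem.List.slice rev none (some (-n)))
  else
    some (PySem.List.slice l none (some n) == PySem.List.slice rev (some (-n)) none)

def reflection_offsets (line : String) : List Int :=
  let l := line.toList
  let rev := l.reverse
  let r := if l.length % 2 = 1 then PySem.List.pyRange 1 (l.length : Int) 2
           else PySem.List.pyRange 0 (l.length : Int) 2
  r.foldl (fun offsets i =>
    [(-1 : Int), 1].foldl (fun offsets m =>
      let n := m * i
      if isPalindromeA l rev n = some true then offsets ++ [n] else offsets) offsets) []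

-- ===== PORT B =====
-- Source B's _pal: two-pointer check of s[lo..hi] (hi inclusive)
def palB (s : List Char) (lo hi : Nat) : Bool :=
  if lo < hi then
    if s[lo]? != s[hi]? then false else palB s (lo + 1) (hi - 1)
  else true
termination_by hi - lo
decreasing_by omega

def reflection_offsets_alt (line : String) : List Int :=
  let s := line.toList
  let n := s.length
  (PySem.List.pyRange ((n % 2 : Nat) : Int) (n : Int) 2).foldl (fun offsets i =>
    let offsets := if palB s 0 (n - 1 - i.toNat) then offsets ++ [-i] else offsets
    if palB s i.toNat (n - 1) then offsets ++ [i] else offsets) []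

-- ===== PRECONDITION & SPEC =====
def Spec_reflection_offsets (line : String) (out : List Int) : Prop := out = reflection_offsets_alt line
instance (line : String) (out : List Int) : Decidable (Spec_reflection_offsets line out) := by unfold Spec_reflection_offsets; infer_instance

-- ===== CLAIM (what is proved, stated in full; the proofs are below) =====
def Claim_equal_reflection_offsets : Prop := ∀ (line : String), Dom_reflection_offsets line → Spec_reflection_offsets line (reflection_offsets line)

-- ===== LEMMAS AND PROOFS =====

-- the two-pointer loop, terminal case: a segment of length ≤ 1 is a palindrome
theorem palB_base (s : List Char) (lo hi : Nat) (hlo : ¬ lo < hi) :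
    (palB s lo hi = true ↔
      ((s.drop lo).take (hi + 1 - lo) = ((s.drop lo).take (hi + 1 - lo)).reverse)) := by
  rw [palB]
  simp only [hlo, if_false, true_iff]
  have hlen : ((s.drop lo).take (hi + 1 - lo)).length ≤ 1 := by
    simp [List.length_take, List.length_drop]; omega
  rcases h : (s.drop lo).take (hi + 1 - lo) with _ | ⟨a, _ | ⟨b, t⟩⟩
  · rfl
  · rfl
  · rw [h] at hlen; simp at hlen

-- characterisation of the two-pointer loop: it decides palindromicity of s[lo..hi]
theorem palB_spec_aux (s : List Char) : ∀ (d lo hi : Nat), hi - lo ≤ d → hi < s.length →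
    (palB s lo hi = true ↔
      ((s.drop lo).take (hi + 1 - lo) = ((s.drop lo).take (hi + 1 - lo)).reverse)) := by
  intro d
  induction d with
  | zero =>
    intro lo hi hd _
    exact palB_base s lo hi (by omega)
  | succ d ih =>
    intro lo hi hd hhi
    by_cases hlt : lo < hi
    · rw [palB]
      simp only [hlt, if_true]
      have hlo : lo < s.length := by omega
      have hd1 : s.drop lo = s[lo] :: s.drop (lo + 1) := List.drop_eq_getElem_cons hlo
      have hm : hi - 1 - lo < (s.drop (lo + 1)).length := by
        simp [List.length_drop]; omega
      have htake : (s.drop (lo + 1)).take (hi - 1 - lo + 1)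
          = (s.drop (lo + 1)).take (hi - 1 - lo) ++ [(s.drop (lo + 1))[hi - 1 - lo]] :=
        List.take_succ_eq_append_getElem hm
      have hgb : (s.drop (lo + 1))[hi - 1 - lo] = s[hi] := by
        rw [List.getElem_drop]; congr 1; omega
      have h1 : hi + 1 - lo = (hi - 1 - lo) + 1 + 1 := by omega
      have hIH := ih (lo + 1) (hi - 1) (by omega) (by omega)
      have h2 : hi - 1 + 1 - (lo + 1) = hi - 1 - lo := by omega
      rw [h2] at hIH
      set mid := (s.drop (lo + 1)).take (hi - 1 - lo) with hmid
      rw [h1, hd1]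
      simp only [List.take_succ_cons]
      rw [htake, hgb]
      have hbeq : (s[lo]? != s[hi]?) = !(s[lo] == s[hi]) := by
        rw [List.getElem?_eq_getElem hlo, List.getElem?_eq_getElem hhi]
        rfl
      rw [hbeq]
      have hrev : (s[lo] :: (mid ++ [s[hi]])).reverse = s[hi] :: (mid.reverse ++ [s[lo]]) := by
        simp
      have hsplit : (s[lo] :: (mid ++ [s[hi]]) = (s[lo] :: (mid ++ [s[hi]])).reverse)
          ↔ (s[lo] = s[hi] ∧ mid = mid.reverse) := by
        rw [hrev, List.cons.injEq]
        constructor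
        · rintro ⟨hab, htail⟩
          exact ⟨hab, (List.append_inj' htail (by simp)).1⟩
        · rintro ⟨hab, hmm⟩
          exact ⟨hab, by rw [← hmm, hab]⟩
      rw [hsplit]
      by_cases hab : s[lo] = s[hi]
      · simp only [hab, beq_self_eq_true, Bool.not_true, Bool.false_eq_true, if_false]
        rw [hIH]
        tauto
      · have hf : (s[lo] == s[hi]) = false := by simp [hab]
        simp only [hf, Bool.not_false, if_true]
        constructor
        · intro h; exact absurd h (by simp)
        · rintro ⟨h, -⟩; exact absurd h hab
    · exact palB_base s lo hi hlt

-- A's `line == rev_line` (offset 0) as a palindrome statement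
theorem condA_zero (l : List Char) (h2 : 2 ≤ l.length) :
    (isPalindromeA l l.reverse 0 = some true) ↔ (l = l.reverse) := by
  unfold isPalindromeA
  rw [if_neg (by simp; omega), if_pos rfl]
  simp

-- A's `line[n:] == rev_line[:-n]` (n = k > 0) says: the suffix dropping k characters is a palindrome
theorem condA_pos (l : List Char) (k : Nat) (h1 : 0 < k) (h2 : k + 2 ≤ l.length) :
    (isPalindromeA l l.reverse (k : Int) = some true) ↔ (l.drop k = (l.drop k).reverse) := by
  unfold isPalindromeA
  rw [if_neg (by simp; omega), if_neg (by exact_mod_cast Nat.pos_iff_ne_zero.mp h1),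
    if_pos (by exact_mod_cast h1)]
  rw [PySem.List.slice_from_natCast, PySem.List.slice_to_neg_natCast _ _ h1]
  simp only [List.length_reverse]
  rw [← List.reverse_drop]
  simp

-- A's `line[:n] == rev_line[-n:]` (n = -k < 0) says: the prefix keeping len-k characters is a palindrome
theorem condA_neg (l : List Char) (k : Nat) (h1 : 0 < k) (h2 : k + 2 ≤ l.length) :
    (isPalindromeA l l.reverse (-(k : Int)) = some true) ↔
      (l.take (l.length - k) = (l.take (l.length - k)).reverse) := by
  unfold isPalindromeA
  rw [if_neg (by simp; omega), if_neg (by omega), if_neg (by omega)]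
  rw [neg_neg, PySem.List.slice_to_neg_natCast _ _ h1, PySem.List.slice_from_natCast]
  rw [List.drop_reverse]
  simp

-- B's prefix check palB l 0 (len-1-k) decides the same prefix-palindrome condition
theorem palB_take (l : List Char) (k : Nat) (hk : k < l.length) :
    (palB l 0 (l.length - 1 - k) = true) ↔
      (l.take (l.length - k) = (l.take (l.length - k)).reverse) := by
  have h := palB_spec_aux l (l.length - 1 - k) 0 (l.length - 1 - k) (by omega) (by omega)
  rw [h, List.drop_zero]
  have : l.length - 1 - k + 1 - 0 = l.length - k := by omega
  rw [this]

-- B's suffix check palB l k (len-1) decides the same suffix-palindrome condition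
theorem palB_drop (l : List Char) (k : Nat) (hk : k < l.length) :
    (palB l k (l.length - 1) = true) ↔ (l.drop k = (l.drop k).reverse) := by
  have h := palB_spec_aux l (l.length - 1 - k) k (l.length - 1) (by omega) (by omega)
  rw [h]
  have h1 : l.length - 1 + 1 - k = l.length - k := by omega
  rw [h1, List.take_of_length_le (by simp)]

theorem reflection_offsets_spec' (line : String) :
    reflection_offsets line = reflection_offsets_alt line := by
  unfold reflection_offsets reflection_offsets_alt
  dsimp only
  set l := line.toList with hl
  have hr : (if l.length % 2 = 1 then PySem.List.pyRange 1 (l.length : Int) 2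
      else PySem.List.pyRange 0 (l.length : Int) 2)
      = PySem.List.pyRange ((l.length % 2 : Nat) : Int) (l.length : Int) 2 := by
    rcases Nat.mod_two_eq_zero_or_one l.length with h | h <;> simp [h]
  rw [hr]
  apply PySem.List.foldl_congr_mem
  intro acc i hi
  rw [PySem.List.mem_pyRange_iff_of_pos (by norm_num)] at hi
  obtain ⟨h0, hn, hdvd⟩ := hi
  have h0' : (0 : Int) ≤ i := le_trans (by exact_mod_cast Nat.zero_le _) h0
  lift i to ℕ using h0' with k
  have hk_lt : k < l.length := by exact_mod_cast hn
  -- i has the same parity as len and i < len, so |i| ≤ len - 2: the ValueError guard never fires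
  have hk2 : k + 2 ≤ l.length := by omega
  simp only [List.foldl, one_mul, neg_one_mul, Int.toNat_natCast]
  by_cases hk0 : k = 0
  · subst hk0
    have h2 : 2 ≤ l.length := by omega
    simp only [Nat.cast_zero, neg_zero, Nat.sub_zero] at *
    have hb1 : (palB l 0 (l.length - 1 - 0) = true) ↔ (l = l.reverse) := by
      rw [palB_take l 0 (by omega)]
      simp
    simp only [Nat.sub_zero] at hb1
    simp only [condA_zero l h2, hb1]
  · have hkpos : 0 < k := Nat.pos_of_ne_zero hk0
    simp only [condA_neg l k hkpos hk2, condA_pos l k hkpos hk2,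
      palB_take l k hk_lt, palB_drop l k hk_lt]

-- ===== VERDICT (by name: the statement is the Claim_ definition above) =====
theorem reflection_offsets_spec : Claim_equal_reflection_offsets := by
  intro line _
  exact reflection_offsets_spec' line
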